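-- pv_equiv track=rewrite | github.com/LuukHAN/AdventOfCode | 2015/Dag_5/2015dag5.py | find_doubles
-- ===== SOURCE A (Python) =====
-- def find_doubles(word_list):
--     double_list = []
--     for word in word_list:
--         double_found = False
--         for index, letter in enumerate(word):
--             try:
--                 if letter == word[index + 1]:
--                     double_found = True
--                     break
--             except IndexError:
--                 pass
--         if double_found:
--             double_list.append(word)
--     return double_list
-- ===== SOURCE B (Python) =====
-- def find_doubles(word_list):
--     # A word has a doubled consecutive letter iff the two-character string c+c
--     # occurs in it for some character c of the word: test substring containment
--     # of cc for each distinct character instead of scanning adjacent indices.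
--     return [w for w in word_list if any(c + c in w for c in set(w))]
-- ===== Notes on version B (the rewrite author's own statement) =====
-- stated objective: alternative
-- what changed: Instead of A's enumerate/try-except scan comparing each letter with its successor, B builds the set of distinct characters of each word and keeps the word iff the two-character substring c+c occurs in it for some such c (substring-containment test per distinct character).
import Mathlib
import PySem

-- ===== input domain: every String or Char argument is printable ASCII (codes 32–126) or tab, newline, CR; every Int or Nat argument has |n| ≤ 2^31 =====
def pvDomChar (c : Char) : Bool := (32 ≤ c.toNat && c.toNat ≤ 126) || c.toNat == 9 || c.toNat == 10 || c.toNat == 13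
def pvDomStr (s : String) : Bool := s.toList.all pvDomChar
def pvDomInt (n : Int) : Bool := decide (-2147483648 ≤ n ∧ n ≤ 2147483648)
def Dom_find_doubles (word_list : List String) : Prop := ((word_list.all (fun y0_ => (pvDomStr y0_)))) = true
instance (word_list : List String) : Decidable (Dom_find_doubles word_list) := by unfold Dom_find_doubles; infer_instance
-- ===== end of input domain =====

-- B keeps a word iff the substring c+c occurs in it for some distinct character c of the
-- word, instead of A's index scan comparing each letter with its successor; same value.

-- ===== PORT A =====
-- inner 'for index, letter in enumerate(word)' loop with the try/except IndexError guard;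
-- word[index+1] is PySem.List.pyGet? (none = IndexError → 'pass').
def findDoublesALoop (w : List Char) : List (Int × Char) → Bool
  | [] => false
  | (i, letter) :: rest =>
    match PySem.List.pyGet? w (i + 1) with
    | some next => if letter == next then true else findDoublesALoop w rest
    | none => findDoublesALoop w rest

def find_doubles (word_list : List String) : List String :=
  word_list.foldl
    (fun double_list word =>
      if findDoublesALoop word.toList (PySem.List.enumerate word.toList 0) then
        double_list ++ [word]
      else double_list)
    []

-- ===== PORT B =====
-- 'any(c + c in w for c in set(w))': substring containment 'c + c in w' is
-- PySem.Chars.isIn [c, c] w.toList (exact); any over set(w) is order-insensitive.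
def find_doubles_alt (word_list : List String) : List String :=
  word_list.filter (fun w =>
    (PySem.Set.ofList w.toList).any (fun c => PySem.Chars.isIn [c, c] w.toList))

-- ===== PRECONDITION & SPEC =====
def Spec_find_doubles (word_list : List String) (out : List String) : Prop := out = find_doubles_alt word_list
instance (word_list : List String) (out : List String) : Decidable (Spec_find_doubles word_list out) := by unfold Spec_find_doubles; infer_instance

-- ===== CLAIM (what is proved, stated in full; the proofs are below) =====
def Claim_equal_find_doubles : Prop := ∀ (word_list : List String), Dom_find_doubles word_list → Spec_find_doubles word_list (find_doubles word_list)

-- ===== LEMMAS AND PROOFS =====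

-- proof-only characterisation: some two equal consecutive characters
def hasAdj : List Char → Bool
  | a :: b :: rest => if a == b then true else hasAdj (b :: rest)
  | _ => false

theorem findDoublesALoop_eq (w : List Char) :
    ∀ (cs : List Char) (k : Nat), w.drop k = cs →
      findDoublesALoop w (PySem.List.enumerate cs (k : Int)) = hasAdj cs := by
  intro cs
  induction cs with
  | nil => intro k _; simp [PySem.List.enumerate, findDoublesALoop, hasAdj]
  | cons c rest ih =>
    intro k hk
    have hnext : PySem.List.pyGet? w ((k : Int) + 1) = rest[0]? := by
      have h1 : ((k : Int) + 1) = ((k + 1 : Nat) : Int) := by push_cast; ring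
      rw [h1, PySem.List.pyGet?_natCast]
      have : (w.drop k)[1]? = rest[0]? := by rw [hk]; rfl
      rw [← this, List.getElem?_drop]
    have hdrop : w.drop (k + 1) = rest := by
      have : (w.drop k).drop 1 = rest := by rw [hk]; rfl
      simpa [List.drop_drop, Nat.add_comm] using this
    rw [PySem.List.enumerate_cons]
    show (match PySem.List.pyGet? w ((k : Int) + 1) with
          | some next => if c == next then true else
              findDoublesALoop w (PySem.List.enumerate rest ((k : Int) + 1))
          | none => findDoublesALoop w (PySem.List.enumerate rest ((k : Int) + 1)))
        = hasAdj (c :: rest)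
    rw [hnext]
    cases rest with
    | nil => simp [hasAdj, PySem.List.enumerate, findDoublesALoop]
    | cons d rest' =>
      have hcast : (k : Int) + 1 = ((k + 1 : Nat) : Int) := by push_cast; ring
      have hrec : findDoublesALoop w (PySem.List.enumerate (d :: rest') ((k : Int) + 1))
          = hasAdj (d :: rest') := by rw [hcast]; exact ih (k + 1) hdrop
      by_cases h : c = d
      · simp [hasAdj, h]
      · have hb : (c == d) = false := by simp [h]
        simp only [List.getElem?_cons_zero]
        rw [PySem.List.enumerate_cons] at hrec
        simp [hasAdj, hb, hrec]

theorem hasAdj_append_double (s t : List Char) (c : Char) :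
    hasAdj (s ++ c :: c :: t) = true := by
  induction s with
  | nil => simp [hasAdj]
  | cons a s' ih =>
    cases s' with
    | nil => simp only [List.nil_append, List.cons_append]; by_cases h : a = c <;> simp [hasAdj, h]
    | cons b s'' =>
      simp only [List.cons_append] at ih ⊢
      by_cases h : a = b <;> simp [hasAdj, h, ih]

theorem hasAdj_exists (l : List Char) (h : hasAdj l = true) :
    ∃ c s t, l = s ++ c :: c :: t := by
  induction l with
  | nil => simp [hasAdj] at h
  | cons a l' ih =>
    cases l' with
    | nil => simp [hasAdj] at h
    | cons b rest =>
      by_cases hab : a = b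
      · exact ⟨a, [], rest, by simp [hab]⟩
      · have : hasAdj (b :: rest) = true := by simpa [hasAdj, hab] using h
        obtain ⟨c, s, t, hst⟩ := ih this
        exact ⟨c, a :: s, t, by simp [hst]⟩

theorem setAny_eq_hasAdj (l : List Char) :
    (PySem.Set.ofList l).any (fun c => PySem.Chars.isIn [c, c] l) = hasAdj l := by
  by_cases h : hasAdj l = true
  · rw [h]
    obtain ⟨c, s, t, hst⟩ := hasAdj_exists l h
    rw [List.any_eq_true]
    refine ⟨c, ?_, ?_⟩
    · rw [PySem.Set.mem_ofList, hst]; simp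
    · rw [PySem.Chars.isIn_iff_infix]
      exact ⟨s, t, by simp [hst]⟩
  · rw [Bool.not_eq_true] at h
    rw [h, List.any_eq_false]
    intro c _ hc
    rw [PySem.Chars.isIn_iff_infix] at hc
    obtain ⟨s, t, hst⟩ := hc
    have := hasAdj_append_double s t c
    rw [show s ++ [c, c] ++ t = s ++ c :: c :: t by simp] at hst
    rw [hst] at this
    rw [h] at this
    exact absurd this (by simp)

theorem find_doubles_eq (word_list : List String) :
    find_doubles word_list = find_doubles_alt word_list := by
  unfold find_doubles find_doubles_alt
  rw [PySem.List.foldl_append_if_eq_filter, List.nil_append]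
  apply List.filter_congr
  intro w _
  rw [setAny_eq_hasAdj]
  simpa using findDoublesALoop_eq w.toList w.toList 0 (by simp)

-- ===== VERDICT (by name: the statement is the Claim_ definition above) =====
theorem find_doubles_spec : Claim_equal_find_doubles := by
  intro word_list _
  exact find_doubles_eq word_list
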